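-- pv_equiv track=rewrite | github.com/randellconley/rsc02 | rscrew/src/rscrew/interactive_dialogue.py | filter_redundant_questions
-- ===== SOURCE A (Python) =====
-- from typing import Dict, List, Tuple, Optional
--
-- def filter_redundant_questions(questions: List[str], request: str) -> List[str]:
--     """Remove questions already answered by the request context"""
--     request_lower = request.lower()
--     filtered = []
--
--     for question in questions:
--         # Skip if request already contains relevant information
--         if "framework" in question.lower() and any(fw in request_lower for fw in ['flask', 'django', 'express', 'react']):
--             continue
--         if "platform" in question.lower() and any(pl in request_lower for pl in ['ios', 'android', 'web']):
--             continue
--         if "database" in question.lower() and any(db in request_lower for db in ['postgres', 'mysql', 'mongo']):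
--             continue
--
--         filtered.append(question)
--
--     return filtered
-- ===== SOURCE B (Python) =====
-- def filter_redundant_questions(questions, request):
--     """Remove questions already answered by the request context.
--
--     Staged passes: for each category whose signal appears in the request,
--     run a separate pass over the remaining questions removing those that
--     mention that category's keyword.
--     """
--     request_lower = request.lower()
--     table = [
--         ('framework', ['flask', 'django', 'express', 'react']),
--         ('platform', ['ios', 'android', 'web']),
--         ('database', ['postgres', 'mysql', 'mongo']),
--     ]
--     remaining = list(questions)
--     for keyword, signals in table:
--         if any(sig in request_lower for sig in signals):
--             remaining = [q for q in remaining if keyword not in q.lower()]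
--     return remaining
-- ===== Notes on version B (the rewrite author's own statement) =====
-- stated objective: alternative
-- what changed: Inverts the loop structure: instead of checking all three categories inside one pass over the questions, B first decides per category whether the request answers it, then runs one whole-list filtering pass per answered category, whittling the list; request-side signal scans happen once instead of per question, and unanswered categories cost nothing.
import Mathlib
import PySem

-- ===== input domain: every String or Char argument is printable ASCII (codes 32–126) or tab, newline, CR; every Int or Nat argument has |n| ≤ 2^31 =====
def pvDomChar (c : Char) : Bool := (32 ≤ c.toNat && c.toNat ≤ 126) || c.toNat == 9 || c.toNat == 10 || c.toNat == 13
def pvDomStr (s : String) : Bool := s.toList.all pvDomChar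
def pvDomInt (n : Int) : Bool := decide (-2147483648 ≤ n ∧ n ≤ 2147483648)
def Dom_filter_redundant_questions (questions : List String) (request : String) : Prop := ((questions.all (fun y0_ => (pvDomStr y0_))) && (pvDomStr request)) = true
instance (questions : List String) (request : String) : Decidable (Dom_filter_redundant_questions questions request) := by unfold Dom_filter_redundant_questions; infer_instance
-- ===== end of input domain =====

-- B inverts the loop structure: one whole-list filtering pass per request-answered
-- category instead of per-question multi-category checks (request scanned once per category).

-- ===== PORT A =====
def filter_redundant_questions (questions : List String) (request : String) : List String :=
  let request_lower := PySem.Str.lower request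
  questions.foldl (fun filtered question =>
    if PySem.Str.isIn "framework" (PySem.Str.lower question) &&
        (["flask", "django", "express", "react"].any fun fw => PySem.Str.isIn fw request_lower) then
      filtered
    else if PySem.Str.isIn "platform" (PySem.Str.lower question) &&
        (["ios", "android", "web"].any fun pl => PySem.Str.isIn pl request_lower) then
      filtered
    else if PySem.Str.isIn "database" (PySem.Str.lower question) &&
        (["postgres", "mysql", "mongo"].any fun db => PySem.Str.isIn db request_lower) then
      filtered
    else
      filtered ++ [question]) []

-- ===== PORT B =====
def pvRedundancyTable : List (String × List String) :=
  [("framework", ["flask", "django", "express", "react"]),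
   ("platform", ["ios", "android", "web"]),
   ("database", ["postgres", "mysql", "mongo"])]

def filter_redundant_questions_alt (questions : List String) (request : String) : List String :=
  let request_lower := PySem.Str.lower request
  pvRedundancyTable.foldl (fun remaining p =>
    if p.2.any (fun sig => PySem.Str.isIn sig request_lower) then
      remaining.filter (fun q => ! PySem.Str.isIn p.1 (PySem.Str.lower q))
    else
      remaining) questions

-- ===== PRECONDITION & SPEC =====
def Spec_filter_redundant_questions (questions : List String) (request : String) (out : List String) : Prop := out = filter_redundant_questions_alt questions request
instance (questions : List String) (request : String) (out : List String) : Decidable (Spec_filter_redundant_questions questions request out) := by unfold Spec_filter_redundant_questions; infer_instance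

-- ===== CLAIM (what is proved, stated in full; the proofs are below) =====
def Claim_equal_filter_redundant_questions : Prop := ∀ (questions : List String) (request : String), Dom_filter_redundant_questions questions request → Spec_filter_redundant_questions questions request (filter_redundant_questions questions request)

-- ===== LEMMAS AND PROOFS =====

-- A's loop (skip on any of its three conditions, else append) is a filter.
theorem pv_foldl_skip3_eq_filter (c1 c2 c3 : String → Bool) (qs acc : List String) :
    qs.foldl (fun filtered q =>
        if c1 q then filtered
        else if c2 q then filtered
        else if c3 q then filtered
        else filtered ++ [q]) acc
      = acc ++ qs.filter (fun q => !(c1 q || c2 q || c3 q)) := by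
  induction qs generalizing acc with
  | nil => simp
  | cons q qs ih =>
    simp only [List.foldl_cons, List.filter_cons]
    cases h1 : c1 q <;> cases h2 : c2 q <;> cases h3 : c3 q <;>
      simp [h1, h2, h3, ih, List.append_assoc]

theorem filter_redundant_questions_eq (questions : List String) (request : String) :
    filter_redundant_questions questions request
      = filter_redundant_questions_alt questions request := by
  unfold filter_redundant_questions filter_redundant_questions_alt pvRedundancyTable
  rw [pv_foldl_skip3_eq_filter]
  simp only [List.foldl_cons, List.foldl_nil, List.nil_append]
  cases h1 : (["flask", "django", "express", "react"].any fun fw =>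
      PySem.Str.isIn fw (PySem.Str.lower request)) <;>
  cases h2 : (["ios", "android", "web"].any fun pl =>
      PySem.Str.isIn pl (PySem.Str.lower request)) <;>
  cases h3 : (["postgres", "mysql", "mongo"].any fun db =>
      PySem.Str.isIn db (PySem.Str.lower request)) <;>
    simp [h1, h2, h3, List.filter_filter] <;>
    exact List.filter_congr (by intro q _; ac_rfl)

-- ===== VERDICT (by name: the statement is the Claim_ definition above) =====
theorem filter_redundant_questions_spec : Claim_equal_filter_redundant_questions := by
  intro questions request _
  exact filter_redundant_questions_eq questions request
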